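-- pv_equiv track=rewrite | github.com/Shaydu/mondrian-macos | extract_camera_passages.py | extract_camera_section
-- ===== SOURCE A (Python) =====
-- def extract_camera_section(corpus_text: str) -> str:
--     """Extract just The Camera book section from corpus, skipping preamble."""
--     # The Camera appears first in the corpus (lines 1-8660 approx)
--     # Skip preamble and start from Chapter 1 (around line 450)
--     # The Print starts around line 8661
--     lines = corpus_text.split('\n')
--
--     camera_start = None
--     chapter_start = None
--     print_start = None
--
--     for i, line in enumerate(lines):
--         if line.strip() == 'The Camera' and camera_start is None:
--             camera_start = i
--         # Find Chapter 1 to skip preamble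
--         if line.strip() == 'Chapter 1' and camera_start is not None and chapter_start is None:
--             chapter_start = i
--         if line.strip() == 'The Print' and print_start is None:
--             print_start = i
--             break
--
--     if camera_start is None:
--         raise ValueError("Could not find 'The Camera' section in corpus")
--
--     if chapter_start is None:
--         # Fall back to camera_start if no Chapter 1 found
--         chapter_start = camera_start
--
--     if print_start is None:
--         # Take everything after Chapter 1
--         camera_lines = lines[chapter_start:]
--     else:
--         # Take only Camera chapters (skip preamble, stop before Print)
--         camera_lines = lines[chapter_start:print_start]
--
--     return '\n'.join(camera_lines)
-- ===== SOURCE B (Python) =====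
-- def extract_camera_section(corpus_text: str) -> str:
--     """Extract just The Camera book section from corpus, skipping preamble."""
--     lines = corpus_text.split('\n')
--     stripped = [l.strip() for l in lines]
--     try:
--         print_start = stripped.index('The Print')
--         region = stripped[:print_start]
--     except ValueError:
--         print_start = None
--         region = stripped
--     camera_start = region.index('The Camera')
--     try:
--         chapter_start = region.index('Chapter 1', camera_start + 1)
--     except ValueError:
--         chapter_start = camera_start
--     return '\n'.join(lines[chapter_start:print_start])
-- ===== Notes on version B (the rewrite author's own statement) =====
-- stated objective: simpler
-- what changed: Replaces the single three-state guarded scan with a slice-then-search decomposition: find the first 'The Print', restrict to the region before it, then search that region for 'The Camera' and for 'Chapter 1' after it, and slice.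
import Mathlib
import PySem

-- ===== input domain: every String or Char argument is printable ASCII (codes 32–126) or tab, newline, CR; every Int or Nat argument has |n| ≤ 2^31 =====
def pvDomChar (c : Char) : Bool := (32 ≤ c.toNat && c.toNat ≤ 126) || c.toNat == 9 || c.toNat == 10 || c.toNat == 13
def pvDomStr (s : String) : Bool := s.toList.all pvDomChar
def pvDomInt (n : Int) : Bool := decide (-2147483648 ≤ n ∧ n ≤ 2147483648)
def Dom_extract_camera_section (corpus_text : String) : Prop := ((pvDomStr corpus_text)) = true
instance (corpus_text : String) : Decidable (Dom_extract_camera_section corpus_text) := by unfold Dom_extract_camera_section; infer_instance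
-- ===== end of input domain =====

-- B replaces A's single three-state scan with a break by slice-then-search passes over the stripped lines (objective: simpler).

-- ===== PORT A =====
-- the for-loop with its three Option states and the break on 'The Print'
def pvLoopA (lines : List String) (i : Nat) (cs ch ps : Option Nat) :
    Option Nat × Option Nat × Option Nat :=
  match lines with
  | [] => (cs, ch, ps)
  | l :: rest =>
    let cs' := if PySem.Str.strip l == "The Camera" && cs.isNone then some i else cs
    let ch' := if PySem.Str.strip l == "Chapter 1" && cs'.isSome && ch.isNone then some i else ch
    if PySem.Str.strip l == "The Print" && ps.isNone then (cs', ch', some i)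
    else pvLoopA rest (i + 1) cs' ch' ps


def extract_camera_section (corpus_text : String) : String :=
  let lines := (PySem.Str.split? corpus_text "\n").getD []
  match pvLoopA lines 0 none none none with
  | (none, _, _) => ""
  | (some c, ch?, ps?) =>
    let chapter_start := ch?.getD c
    let camera_lines :=
      match ps? with
      | none => PySem.List.slice lines (some (chapter_start : Int)) none
      | some p => PySem.List.slice lines (some (chapter_start : Int)) (some (p : Int))
    PySem.Str.join "\n" camera_lines


-- ===== PORT B =====
def extract_camera_section_alt (corpus_text : String) : String :=
  let lines := (PySem.Str.split? corpus_text "\n").getD []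
  let stripped := lines.map PySem.Str.strip
  let ps? := PySem.List.index? stripped "The Print"
  let region := match ps? with
                | some p => stripped.take p
                | none => stripped
  match PySem.List.index? region "The Camera" with
  | none => ""
  | some c =>
    let chapter_start := match PySem.List.index? (region.drop (c + 1)) "Chapter 1" with
                         | some k => c + 1 + k
                         | none => c
    let tail := match ps? with
                | some p => (lines.drop chapter_start).take (p - chapter_start)
                | none => lines.drop chapter_start
    PySem.Str.join "\n" tail

-- ===== PRECONDITION & SPEC =====
-- Pre_ excludes exactly the inputs where A raises ValueError: no 'The Camera' line (stripped) before the first 'The Print' line.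
def Pre_extract_camera_section (corpus_text : String) : Prop :=
  let stripped := ((PySem.Str.split? corpus_text "\n").getD []).map PySem.Str.strip
  "The Camera" ∈ (match PySem.List.index? stripped "The Print" with
                  | some p => stripped.take p
                  | none => stripped)
instance (corpus_text : String) : Decidable (Pre_extract_camera_section corpus_text) := by
  unfold Pre_extract_camera_section; infer_instance

def pvWitness_extract_camera_section : String := "The Camera\nChapter 1\ntext\nThe Print"

def Spec_extract_camera_section (corpus_text : String) (out : String) : Prop :=
  out = extract_camera_section_alt corpus_text
instance (corpus_text : String) (out : String) : Decidable (Spec_extract_camera_section corpus_text out) := by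
  unfold Spec_extract_camera_section; infer_instance

-- ===== CLAIM (what is proved, stated in full; the proofs are below) =====
def Claim_equal_extract_camera_section : Prop :=
  ∀ (corpus_text : String), Dom_extract_camera_section corpus_text →
    Pre_extract_camera_section corpus_text →
    Spec_extract_camera_section corpus_text (extract_camera_section corpus_text)

-- ===== LEMMAS AND PROOFS =====
theorem pvCompAdd (a b : Nat) : ((fun x : Nat => x + a) ∘ fun x => x + b) = fun x => x + (b + a) := by
  funext x; simp only [Function.comp_apply]; omega

theorem pvMapAddCongr (o : Option Nat) {a b : Nat} (h : a = b) :
    Option.map (fun x => x + a) o = Option.map (fun x => x + b) o := by rw [h]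

theorem pvLoopA_phaseP (lines : List String) (i c h : Nat) :
    pvLoopA lines i (some c) (some h) none =
      (some c, some h,
       (PySem.List.index? (lines.map PySem.Str.strip) "The Print").map (· + i)) := by
  induction lines generalizing i with
  | nil => simp [pvLoopA, PySem.List.index?]
  | cons l rest ih =>
    by_cases hp : PySem.Str.strip l = "The Print"
    · simp [pvLoopA, hp, List.idxOf?_cons]
    · simp [pvLoopA, ih, List.idxOf?_cons, hp, pvCompAdd, Nat.one_add]

theorem pvLoopA_phaseC (lines : List String) (i c : Nat) :
    pvLoopA lines i (some c) none none =
      (let st := lines.map PySem.Str.strip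
       let p? := PySem.List.index? st "The Print"
       let reg := match p? with | some p => st.take p | none => st
       (some c, (PySem.List.index? reg "Chapter 1").map (· + i), p?.map (· + i))) := by
  induction lines generalizing i with
  | nil => simp [pvLoopA, PySem.List.index?]
  | cons l rest ih =>
    by_cases hp : PySem.Str.strip l = "The Print"
    · simp [pvLoopA, hp, List.idxOf?_cons, PySem.List.index?]
    · by_cases hc : PySem.Str.strip l = "Chapter 1"
      · simp [pvLoopA, hc, hp, pvLoopA_phaseP, List.idxOf?_cons]
        cases hk : List.idxOf? "The Print" (rest.map PySem.Str.strip) with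
        | none => simp [List.idxOf?_cons, hc]
        | some p => simp [List.take_succ_cons, List.idxOf?_cons, hc, pvCompAdd, Nat.one_add]
      · simp [pvLoopA, hc, hp, ih, List.idxOf?_cons]
        cases hk : List.idxOf? "The Print" (rest.map PySem.Str.strip) with
        | none => simp [List.idxOf?_cons, hc, pvCompAdd, Nat.one_add]
        | some p => simp [List.take_succ_cons, List.idxOf?_cons, hc, pvCompAdd, Nat.one_add]

theorem pvLoopA_phaseA (lines : List String) (i : Nat) :
    pvLoopA lines i none none none =
      (let st := lines.map PySem.Str.strip
       let p? := PySem.List.index? st "The Print"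
       let reg := match p? with | some p => st.take p | none => st
       match PySem.List.index? reg "The Camera" with
       | none => (none, none, p?.map (· + i))
       | some c =>
         (some (c + i),
          (PySem.List.index? (reg.drop (c + 1)) "Chapter 1").map (· + (c + 1 + i)),
          p?.map (· + i))) := by
  induction lines generalizing i with
  | nil => simp [pvLoopA, PySem.List.index?]
  | cons l rest ih =>
    by_cases hp : PySem.Str.strip l = "The Print"
    · simp [pvLoopA, hp, List.idxOf?_cons, PySem.List.index?]
    · by_cases hcam : PySem.Str.strip l = "The Camera"
      · simp [pvLoopA, hcam, hp, pvLoopA_phaseC, List.idxOf?_cons]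
        cases hk : List.idxOf? "The Print" (rest.map PySem.Str.strip) with
        | none => simp [List.idxOf?_cons, hcam, Nat.one_add, pvCompAdd]
        | some p => simp [List.take_succ_cons, List.idxOf?_cons, hcam, pvCompAdd, Nat.one_add]
      · simp [pvLoopA, hcam, hp, ih, List.idxOf?_cons]
        cases hk : List.idxOf? "The Print" (rest.map PySem.Str.strip) with
        | none =>
          cases hc : List.idxOf? "The Camera" (rest.map PySem.Str.strip) with
          | none => simp [List.idxOf?_cons, hcam, hc, pvCompAdd, Nat.one_add]
          | some c =>
            simp [List.idxOf?_cons, hcam, hc, pvCompAdd, Nat.one_add]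
            exact ⟨by omega, pvMapAddCongr _ (by omega)⟩
        | some p =>
          cases hc : List.idxOf? "The Camera" ((rest.map PySem.Str.strip).take p) with
          | none => simp [List.take_succ_cons, List.idxOf?_cons, hcam, hc, pvCompAdd, Nat.one_add]
          | some c =>
            simp [List.take_succ_cons, List.idxOf?_cons, hcam, hc, pvCompAdd, Nat.one_add]
            exact ⟨by omega, pvMapAddCongr _ (by omega)⟩
-- ===== VERDICT (by name: the statement is the Claim_ definition above) =====
theorem extract_camera_section_spec : Claim_equal_extract_camera_section := by
  intro s _hdom hpre
  unfold Spec_extract_camera_section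
  unfold extract_camera_section extract_camera_section_alt
  simp only [pvLoopA_phaseA]
  unfold Pre_extract_camera_section at hpre
  set lines := (PySem.Str.split? s "\n").getD [] with hlines
  set st := lines.map PySem.Str.strip with hst
  cases hk : PySem.List.index? st "The Print" with
  | none =>
    simp only [hk] at hpre ⊢
    cases hc : PySem.List.index? st "The Camera" with
    | none =>
      exfalso; rw [PySem.List.index?_eq_none_iff] at hc; exact hc hpre
    | some c =>
      simp only [hc]
      cases hch : PySem.List.index? (st.drop (c+1)) "Chapter 1" with
      | none => simp [PySem.List.slice_from_natCast]
      | some k =>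
        simp
        rw [show ((k : Int) + ((c : Int) + 1)) = ((c + 1 + k : Nat) : Int) by push_cast; ring,
          PySem.List.slice_from_natCast]
  | some p =>
    simp only [hk] at hpre ⊢
    cases hc : PySem.List.index? (st.take p) "The Camera" with
    | none =>
      exfalso; rw [PySem.List.index?_eq_none_iff] at hc; exact hc hpre
    | some c =>
      simp only [hc]
      cases hch : PySem.List.index? ((st.take p).drop (c+1)) "Chapter 1" with
      | none => simp [PySem.List.slice_natCast]
      | some k =>
        simp
        rw [show ((k : Int) + ((c : Int) + 1)) = ((c + 1 + k : Nat) : Int) by push_cast; ring,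
          PySem.List.slice_natCast]
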